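-- pv_equiv track=rewrite | github.com/manuel-calzadaa-laureate-mx/LaureateTools | files/b9_completed_procedures_file.py | _extract_all_package_body_objects_from_source_code_data
-- ===== SOURCE A (Python) =====
-- def _extract_all_package_body_objects_from_source_code_data(source_code_lines: str, owner: str, package: str):
--     objects = []
--     current_object = None
--     object_code = []
--
--     for line in source_code_lines:
--         stripped_line = line.strip()
--         upper_line = stripped_line.upper()
--
--         # Check for procedure or function start
--         if (upper_line.startswith('PROCEDURE ') or upper_line.startswith('FUNCTION ')) and (
--                 len(stripped_line) > len('PROCEDURE ') and stripped_line[len('PROCEDURE'):].lstrip()[0].isalnum()):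
--
--             if current_object:  # Save previous object if exists
--                 objects.append({
--                     'object_package': package,
--                     'object_owner': owner,
--                     'object_type': current_object['type'].upper(),
--                     'object_name': current_object['name'],
--                     'code': ''.join(object_code).strip()
--                 })
--
--             # Start new object
--             parts = stripped_line.split()
--             object_type = parts[0].upper()
--             object_name = parts[1].split('(')[0]  # Get name before parameters
--
--             current_object = {
--                 'object_package': package,
--                 'object_owner': owner,
--                 'type': object_type,
--                 'name': object_name
--             }
--             object_code = [line]
--
--         elif current_object:  # If we're inside an object
--             object_code.append(line)
--
--             # Improved and properly parenthesized END detection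
--             if (upper_line.replace(' ', '') == 'END;' or
--                     (upper_line.startswith('END ') and
--                      (stripped_line.endswith(';') and
--                       (upper_line.endswith(';') or
--                        f'END {current_object["name"].upper()};' in upper_line)))):
--                 objects.append({
--                     'object_package': package,
--                     'object_owner': owner,
--                     'object_type': current_object['type'],
--                     'object_name': current_object['name'],
--                     'code': ''.join(object_code).strip()
--                 })
--                 current_object = None
--                 object_code = []
--
--     # Add any remaining object
--     if current_object:
--         objects.append({
--             'object_package': package,
--             'object_owner': owner,
--             'object_type': current_object['type'],
--             'object_name': current_object['name'],
--             'code': ''.join(object_code).strip()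
--         })
--
--     return objects
-- ===== SOURCE B (Python) =====
-- def _extract_all_package_body_objects_from_source_code_data(source_code_lines: str, owner: str, package: str):
--     # Same extraction by a different decomposition: instead of a one-pass state machine
--     # with current_object/object_code accumulators, an index cursor finds each start line
--     # and an inner scan consumes its body up to the first END line (inclusive) or the next
--     # start line (exclusive) or end of input; the object is emitted from the line span.
--     def is_start(stripped):
--         u = stripped.upper()
--         return (u.startswith('PROCEDURE ') or u.startswith('FUNCTION ')) and (
--             len(stripped) > len('PROCEDURE ') and stripped[len('PROCEDURE'):].lstrip()[0].isalnum())
--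
--     def is_end(stripped, name):
--         u = stripped.upper()
--         return (u.replace(' ', '') == 'END;' or
--                 (u.startswith('END ') and
--                  (stripped.endswith(';') and
--                   (u.endswith(';') or f'END {name.upper()};' in u))))
--
--     objects = []
--     n = len(source_code_lines)
--     i = 0
--     while i < n:
--         stripped = source_code_lines[i].strip()
--         if not is_start(stripped):
--             i += 1
--             continue
--         parts = stripped.split()
--         obj_type = parts[0].upper()
--         obj_name = parts[1].split('(')[0]
--         j = i + 1
--         while j < n:
--             s2 = source_code_lines[j].strip()
--             if is_start(s2):
--                 break
--             if is_end(s2, obj_name):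
--                 j += 1
--                 break
--             j += 1
--         objects.append({
--             'object_package': package,
--             'object_owner': owner,
--             'object_type': obj_type,
--             'object_name': obj_name,
--             'code': ''.join(source_code_lines[i:j]).strip(),
--         })
--         i = j
--     return objects
-- ===== Notes on version B (the rewrite author's own statement) =====
-- stated objective: alternative
-- what changed: Replaced A's single-pass state machine with current_object/object_code accumulator variables by a cursor loop that locates each start line and an inner scan that consumes that object's body up to its END line (inclusive) or the next start line (exclusive) or end of input, emitting each object from its line span.
import Mathlib
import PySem

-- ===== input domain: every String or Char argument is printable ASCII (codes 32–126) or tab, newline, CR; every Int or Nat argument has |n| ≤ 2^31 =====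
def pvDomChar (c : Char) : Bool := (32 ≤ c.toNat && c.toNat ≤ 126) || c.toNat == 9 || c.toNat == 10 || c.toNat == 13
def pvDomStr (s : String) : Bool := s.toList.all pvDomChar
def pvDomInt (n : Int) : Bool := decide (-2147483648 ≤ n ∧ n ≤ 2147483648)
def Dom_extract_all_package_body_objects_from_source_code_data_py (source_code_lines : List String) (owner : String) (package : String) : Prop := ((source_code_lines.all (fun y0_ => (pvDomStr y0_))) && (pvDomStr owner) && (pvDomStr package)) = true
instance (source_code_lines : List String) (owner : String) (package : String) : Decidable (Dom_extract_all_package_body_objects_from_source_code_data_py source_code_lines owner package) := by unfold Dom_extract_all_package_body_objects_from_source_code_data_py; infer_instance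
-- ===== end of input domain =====

-- B replaces A's one-pass state machine (current_object/object_code accumulators) with a
-- cursor that finds each start line and an inner scan consuming its body; same result (alternative decomposition).


-- ===== PORT A =====
-- A's loop body: state = (objects so far, current object's (type, name) if any, object_code lines).
-- current_object's constant 'object_package'/'object_owner' entries are the parameters and are inlined at emit time.
def pvAStep (owner package : String)
    (st : List (List (String × String)) × Option (String × String) × List String)
    (line : String) : List (List (String × String)) × Option (String × String) × List String :=
  let stripped := PySem.Str.strip line
  let upper_line := PySem.Str.upper stripped
  if (PySem.Str.startswith upper_line "PROCEDURE " || PySem.Str.startswith upper_line "FUNCTION ") &&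
     (decide ((10 : Int) < PySem.Str.len stripped) &&
      ((PySem.Str.pyGet? (PySem.Str.lstrip (PySem.Str.slice stripped (some 9) none)) 0).elim false PySem.Chars.isalnum)) then
    -- save previous object if exists
    let objects := match st.2.1 with
      | some (t, nm) => st.1 ++ [[("object_package", package), ("object_owner", owner),
          ("object_type", PySem.Str.upper t), ("object_name", nm),
          ("code", PySem.Str.strip (PySem.Str.join "" st.2.2))]]
      | none => st.1
    -- start new object
    let parts := PySem.Str.split₀ stripped
    let object_type := PySem.Str.upper (PySem.List.pyGetD parts 0 "")
    let object_name := PySem.List.pyGetD ((PySem.Str.split? (PySem.List.pyGetD parts 1 "") "(").getD []) 0 ""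
    (objects, some (object_type, object_name), [line])
  else
    match st.2.1 with
    | some (t, nm) =>
      let object_code := st.2.2 ++ [line]
      if PySem.Str.replace upper_line " " "" == "END;" ||
         (PySem.Str.startswith upper_line "END " &&
          (PySem.Str.endswith stripped ";" &&
           (PySem.Str.endswith upper_line ";" ||
            PySem.Str.isIn ("END " ++ PySem.Str.upper nm ++ ";") upper_line))) then
        (st.1 ++ [[("object_package", package), ("object_owner", owner),
           ("object_type", t), ("object_name", nm),
           ("code", PySem.Str.strip (PySem.Str.join "" object_code))]], none, [])
      else
        (st.1, some (t, nm), object_code)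
    | none => st

def extract_all_package_body_objects_from_source_code_data_py (source_code_lines : List String) (owner : String) (package : String) : List (List (String × String)) :=
  let final := source_code_lines.foldl (pvAStep owner package) ([], none, [])
  -- add any remaining object
  match final.2.1 with
  | some (t, nm) => final.1 ++ [[("object_package", package), ("object_owner", owner),
      ("object_type", t), ("object_name", nm),
      ("code", PySem.Str.strip (PySem.Str.join "" final.2.2))]]
  | none => final.1

-- ===== PORT B =====
def pvIsStartB (stripped : String) : Bool :=
  let u := PySem.Str.upper stripped
  (PySem.Str.startswith u "PROCEDURE " || PySem.Str.startswith u "FUNCTION ") &&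
  (decide ((10 : Int) < PySem.Str.len stripped) &&
   ((PySem.Str.pyGet? (PySem.Str.lstrip (PySem.Str.slice stripped (some 9) none)) 0).elim false PySem.Chars.isalnum))

def pvIsEndB (stripped : String) (name : String) : Bool :=
  let u := PySem.Str.upper stripped
  PySem.Str.replace u " " "" == "END;" ||
  (PySem.Str.startswith u "END " &&
   (PySem.Str.endswith stripped ";" &&
    (PySem.Str.endswith u ";" || PySem.Str.isIn ("END " ++ PySem.Str.upper name ++ ";") u)))

-- inner scan: body lines of the current object (up to and including its END line, or up to
-- the next start line exclusive / end of input), together with the remaining lines.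
def pvConsume (name : String) : List String → List String × List String
  | [] => ([], [])
  | l :: rest =>
    let s2 := PySem.Str.strip l
    if pvIsStartB s2 then ([], l :: rest)
    else if pvIsEndB s2 name then ([l], rest)
    else
      let br := pvConsume name rest
      (l :: br.1, br.2)

theorem pvConsume_len (name : String) (ls : List String) : (pvConsume name ls).2.length ≤ ls.length := by
  induction ls with
  | nil => simp [pvConsume]
  | cons l rest ih =>
    simp only [pvConsume]
    split
    · simp
    · split
      · simp
      · simpa using Nat.le_succ_of_le ih

def pvScan (owner package : String) : List String → List (List (String × String))
  | [] => []
  | l :: rest =>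
    let stripped := PySem.Str.strip l
    if pvIsStartB stripped then
      let parts := PySem.Str.split₀ stripped
      let object_type := PySem.Str.upper (PySem.List.pyGetD parts 0 "")
      let object_name := PySem.List.pyGetD ((PySem.Str.split? (PySem.List.pyGetD parts 1 "") "(").getD []) 0 ""
      let br := pvConsume object_name rest
      [("object_package", package), ("object_owner", owner),
       ("object_type", object_type), ("object_name", object_name),
       ("code", PySem.Str.strip (PySem.Str.join "" (l :: br.1)))] :: pvScan owner package br.2
    else pvScan owner package rest
  termination_by ls => ls.length
  decreasing_by
    · exact Nat.lt_succ_of_le (pvConsume_len _ rest)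
    · simp

def extract_all_package_body_objects_from_source_code_data_py_alt (source_code_lines : List String) (owner : String) (package : String) : List (List (String × String)) :=
  pvScan owner package source_code_lines

-- ===== PRECONDITION & SPEC =====
def Spec_extract_all_package_body_objects_from_source_code_data_py (source_code_lines : List String) (owner : String) (package : String) (out : List (List (String × String))) : Prop := out = extract_all_package_body_objects_from_source_code_data_py_alt source_code_lines owner package
instance (source_code_lines : List String) (owner : String) (package : String) (out : List (List (String × String))) : Decidable (Spec_extract_all_package_body_objects_from_source_code_data_py source_code_lines owner package out) := by unfold Spec_extract_all_package_body_objects_from_source_code_data_py; infer_instance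

-- ===== CLAIM (what is proved, stated in full; the proofs are below) =====
def Claim_equal_extract_all_package_body_objects_from_source_code_data_py : Prop := ∀ (source_code_lines : List String) (owner : String) (package : String), Dom_extract_all_package_body_objects_from_source_code_data_py source_code_lines owner package → Spec_extract_all_package_body_objects_from_source_code_data_py source_code_lines owner package (extract_all_package_body_objects_from_source_code_data_py source_code_lines owner package)

-- ===== LEMMAS AND PROOFS =====

theorem upperChar_idem (c : Char) : PySem.Chars.upperChar (PySem.Chars.upperChar c) = PySem.Chars.upperChar c := by
  simp only [PySem.Chars.upperChar, PySem.Chars.islower]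
  by_cases h : 'a' ≤ c ∧ c ≤ 'z'
  · have hle : c.toNat ≤ 122 := h.2
    have hge : 97 ≤ c.toNat := h.1
    have hv : Nat.isValidChar (c.toNat - 32) := Or.inl (by omega)
    simp only [h, decide_true, Bool.and_self, if_true]
    have hne : ¬ ('a' ≤ Char.ofNat (c.toNat - 32) ∧ Char.ofNat (c.toNat - 32) ≤ 'z') := by
      intro hc
      have h97 : 97 ≤ (Char.ofNat (c.toNat - 32)).toNat := hc.1
      rw [Char.toNat_ofNat, if_pos hv] at h97
      omega
    simp [hne]
  · simp [h]

theorem upper_idem (s : String) : PySem.Str.upper (PySem.Str.upper s) = PySem.Str.upper s := by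
  simp [PySem.Str.upper, PySem.Chars.upper, List.map_map]
  exact congrArg _ (List.map_congr_left (fun a _ => upperChar_idem a))

-- the emitted object record
def pvObj (owner package t nm code : String) : List (String × String) :=
  [("object_package", package), ("object_owner", owner),
   ("object_type", t), ("object_name", nm), ("code", code)]

-- A's final flush applied to a fold state
def pvFin (owner package : String)
    (st : List (List (String × String)) × Option (String × String) × List String) : List (List (String × String)) :=
  match st.2.1 with
  | some (t, nm) => st.1 ++ [pvObj owner package t nm (PySem.Str.strip (PySem.Str.join "" st.2.2))]
  | none => st.1

-- Joint loop invariant: A's fold from a 'no current object' state produces pvScan of the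
-- remaining lines; from a 'current object (t, nm) with accumulated code' state it produces
-- the object closed by pvConsume followed by pvScan of the rest.
theorem pvMain (owner package : String) (ls : List String) :
    (∀ objs code, pvFin owner package (ls.foldl (pvAStep owner package) (objs, none, code)) =
        objs ++ pvScan owner package ls) ∧
    (∀ objs t nm code, PySem.Str.upper t = t →
        pvFin owner package (ls.foldl (pvAStep owner package) (objs, some (t, nm), code)) =
          objs ++ pvObj owner package t nm
              (PySem.Str.strip (PySem.Str.join "" (code ++ (pvConsume nm ls).1)))
            :: pvScan owner package (pvConsume nm ls).2) := by
  induction ls with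
  | nil =>
    constructor
    · intro objs code; simp [pvFin, pvScan]
    · intro objs t nm code _; simp [pvFin, pvConsume, pvScan]
  | cons l rest ih =>
    constructor
    · intro objs code
      rw [List.foldl_cons]
      by_cases hs : pvIsStartB (PySem.Str.strip l)
      · have hstep : pvAStep owner package (objs, none, code) l =
            (objs, some (PySem.Str.upper (PySem.List.pyGetD (PySem.Str.split₀ (PySem.Str.strip l)) 0 ""),
              PySem.List.pyGetD ((PySem.Str.split? (PySem.List.pyGetD (PySem.Str.split₀ (PySem.Str.strip l)) 1 "") "(").getD []) 0 ""), [l]) := by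
          simp only [pvAStep, pvIsStartB] at hs ⊢
          rw [if_pos hs]
        rw [hstep, ih.2 _ _ _ _ (upper_idem _)]
        conv_rhs => rw [pvScan]
        simp [hs, pvObj]
      · have hstep : pvAStep owner package (objs, none, code) l = (objs, none, code) := by
          simp only [pvAStep, pvIsStartB] at hs ⊢
          rw [if_neg hs]
        rw [hstep, ih.1]
        conv_rhs => rw [pvScan]
        simp [hs]
    · intro objs t nm code hup
      rw [List.foldl_cons]
      by_cases hs : pvIsStartB (PySem.Str.strip l)
      · have hstep : pvAStep owner package (objs, some (t, nm), code) l =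
            (objs ++ [pvObj owner package t nm (PySem.Str.strip (PySem.Str.join "" code))],
             some (PySem.Str.upper (PySem.List.pyGetD (PySem.Str.split₀ (PySem.Str.strip l)) 0 ""),
              PySem.List.pyGetD ((PySem.Str.split? (PySem.List.pyGetD (PySem.Str.split₀ (PySem.Str.strip l)) 1 "") "(").getD []) 0 ""), [l]) := by
          simp only [pvAStep, pvIsStartB] at hs ⊢
          rw [if_pos hs, hup]; rfl
        rw [hstep, ih.2 _ _ _ _ (upper_idem _)]
        have hc : pvConsume nm (l :: rest) = ([], l :: rest) := by
          simp only [pvConsume]; rw [if_pos hs]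
        rw [hc]
        conv_rhs => rw [pvScan]
        simp [hs, pvObj]
      · by_cases he : pvIsEndB (PySem.Str.strip l) nm
        · have hstep : pvAStep owner package (objs, some (t, nm), code) l =
              (objs ++ [pvObj owner package t nm (PySem.Str.strip (PySem.Str.join "" (code ++ [l])))], none, []) := by
            simp only [pvIsStartB] at hs
            simp only [pvIsEndB] at he
            simp only [pvAStep]
            rw [if_neg hs]
            simp only [pvObj]
            rw [if_pos he]
          rw [hstep, ih.1]
          have hc : pvConsume nm (l :: rest) = ([l], rest) := by
            simp only [pvConsume]; rw [if_neg hs, if_pos he]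
          rw [hc]
          simp
        · have hstep : pvAStep owner package (objs, some (t, nm), code) l =
              (objs, some (t, nm), code ++ [l]) := by
            simp only [pvIsStartB] at hs
            simp only [pvIsEndB] at he
            simp only [pvAStep]
            rw [if_neg hs, if_neg he]
          rw [hstep, ih.2 _ _ _ _ hup]
          have hc : pvConsume nm (l :: rest) = (l :: (pvConsume nm rest).1, (pvConsume nm rest).2) := by
            simp only [pvConsume]; rw [if_neg hs, if_neg he]
          rw [hc]
          simp

-- ===== VERDICT (by name: the statement is the Claim_ definition above) =====
theorem extract_all_package_body_objects_from_source_code_data_py_spec : Claim_equal_extract_all_package_body_objects_from_source_code_data_py := by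
  intro source_code_lines owner package _
  show _ = _
  have h := (pvMain owner package source_code_lines).1 [] []
  simpa [extract_all_package_body_objects_from_source_code_data_py,
    extract_all_package_body_objects_from_source_code_data_py_alt, pvFin] using h
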